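-- pv_equiv track=rewrite | github.com/KeepSafe/ks-email-parser | email_parser/placeholder.py | _all_placeholders_for_email_name
-- ===== SOURCE A (Python) =====
-- def _all_placeholders_for_email_name(locale_placeholders):
--     result = {}
--     for counter in locale_placeholders.values():
--         for name, count in counter.items():
--             if name in result and result[name] > count:
--                 continue
--             result[name] = count
--     return result
-- ===== SOURCE B (Python) =====
-- def _all_placeholders_for_email_name(locale_placeholders):
--     grouped = {}
--     for counter in locale_placeholders.values():
--         for name, count in counter.items():
--             grouped[name] = grouped.get(name, []) + [count]
--     return {name: max(counts) for name, counts in grouped.items()}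
-- ===== Notes on version B (the rewrite author's own statement) =====
-- stated objective: alternative
-- what changed: Replaces the running-max-with-guard single pass by a collect-then-reduce decomposition: first group every count per name into a dict of lists (first-appearance order), then a separate pass takes max over each gathered list.
import Mathlib
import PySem

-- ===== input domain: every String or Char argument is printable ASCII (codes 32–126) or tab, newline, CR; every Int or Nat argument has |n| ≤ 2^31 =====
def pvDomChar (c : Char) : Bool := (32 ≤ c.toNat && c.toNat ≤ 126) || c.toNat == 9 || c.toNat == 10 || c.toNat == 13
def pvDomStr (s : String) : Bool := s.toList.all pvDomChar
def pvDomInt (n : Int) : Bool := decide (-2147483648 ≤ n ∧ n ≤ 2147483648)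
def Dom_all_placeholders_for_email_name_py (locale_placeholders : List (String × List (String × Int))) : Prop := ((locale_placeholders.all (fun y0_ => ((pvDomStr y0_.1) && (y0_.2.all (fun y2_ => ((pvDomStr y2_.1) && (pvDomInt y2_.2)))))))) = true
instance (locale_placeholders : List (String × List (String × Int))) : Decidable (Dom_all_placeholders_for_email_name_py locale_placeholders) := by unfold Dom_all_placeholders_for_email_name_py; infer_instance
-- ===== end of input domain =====

-- B replaces A's running-max-with-guard pass by a collect-then-reduce decomposition (same cost); return-value equivalence only.
-- ===== PORT A =====
-- result = {}; for counter in values: for name, count in counter.items():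
--   if name in result and result[name] > count: continue; result[name] = count
-- (result[name] on a contained key is ported as getD name 0; the default is never read)
def all_placeholders_for_email_name_py (locale_placeholders : List (String × List (String × Int))) : List (String × Int) :=
  (locale_placeholders.foldl
    (fun result counter =>
      counter.2.foldl
        (fun result p =>
          if result.contains p.1 = true ∧ result.getD p.1 0 > p.2 then result
          else result.insert p.1 p.2)
        result)
    PySem.Dict.empty).items

-- ===== PORT B =====
-- grouped = {}; for counter in values: for name, count in counter.items():
--   grouped[name] = grouped.get(name, []) + [count]
-- return {name: max(counts) for name, counts in grouped.items()}
def all_placeholders_for_email_name_py_alt (locale_placeholders : List (String × List (String × Int))) : List (String × Int) :=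
  (locale_placeholders.foldl
      (fun grouped counter =>
        counter.2.foldl
          (fun grouped p => grouped.insert p.1 (grouped.getD p.1 [] ++ [p.2]))
          grouped)
      PySem.Dict.empty).items.map (fun q => (q.1, (PySem.List.max? q.2 id).getD 0))

-- ===== PRECONDITION & SPEC =====
def Spec_all_placeholders_for_email_name_py (locale_placeholders : List (String × List (String × Int))) (out : List (String × Int)) : Prop := out = all_placeholders_for_email_name_py_alt locale_placeholders
instance (locale_placeholders : List (String × List (String × Int))) (out : List (String × Int)) : Decidable (Spec_all_placeholders_for_email_name_py locale_placeholders out) := by unfold Spec_all_placeholders_for_email_name_py; infer_instance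

-- ===== CLAIM (what is proved, stated in full; the proofs are below) =====
def Claim_equal_all_placeholders_for_email_name_py : Prop := ∀ (locale_placeholders : List (String × List (String × Int))), Dom_all_placeholders_for_email_name_py locale_placeholders → Spec_all_placeholders_for_email_name_py locale_placeholders (all_placeholders_for_email_name_py locale_placeholders)

-- ===== LEMMAS AND PROOFS =====

-- ===== VERDICT (by name: the statement is the Claim_ definition above) =====
-- abbreviations for the two loop bodies and the reduce map (proof-side only)
def pvStepA (d : PySem.Dict String Int) (p : String × Int) : PySem.Dict String Int :=
  if d.contains p.1 = true ∧ d.getD p.1 0 > p.2 then d else d.insert p.1 p.2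

def pvStepB (g : PySem.Dict String (List Int)) (p : String × Int) : PySem.Dict String (List Int) :=
  g.insert p.1 (g.getD p.1 [] ++ [p.2])

def pvMax (q : String × List Int) : String × Int := (q.1, (PySem.List.max? q.2 id).getD 0)

theorem pvMax_fst (q : String × List Int) : (pvMax q).1 = q.1 := rfl

theorem max?_append_singleton_none (cs : List Int) (c : Int)
    (h : PySem.List.max? cs id = none) :
    PySem.List.max? (cs ++ [c]) id = some c := by
  simp only [PySem.List.max?] at h ⊢
  rw [List.foldl_append, h]
  rfl

theorem max?_append_singleton_some (cs : List Int) (c : Int) {m : Int}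
    (h : PySem.List.max? cs id = some m) :
    PySem.List.max? (cs ++ [c]) id = if m < c then some c else some m := by
  simp only [PySem.List.max?] at h ⊢
  rw [List.foldl_append, h]
  simp

theorem max?_isSome_of_ne_nil (cs : List Int) (h : cs ≠ []) :
    ∃ m, PySem.List.max? cs id = some m := by
  induction cs using List.reverseRecOn with
  | nil => exact absurd rfl h
  | append_singleton t c ih =>
    cases ht : PySem.List.max? t id with
    | none => exact ⟨c, max?_append_singleton_none t c ht⟩
    | some m =>
      rw [max?_append_singleton_some t c ht]
      exact ⟨if m < c then c else m, by split <;> rfl⟩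

theorem keys_eq_of_items_map (dA : PySem.Dict String Int) (dB : PySem.Dict String (List Int))
    (h : dA.items = dB.items.map pvMax) : dA.keys = dB.keys := by
  simp [PySem.Dict.keys, h, Function.comp_def, pvMax]

theorem pv_inv (L : List (String × Int)) :
    ∀ (dA : PySem.Dict String Int) (dB : PySem.Dict String (List Int)),
    dA.items = dB.items.map pvMax →
    dB.keys.Nodup →
    (∀ q ∈ dB.items, q.2 ≠ []) →
    (L.foldl pvStepA dA).items = ((L.foldl pvStepB dB).items).map pvMax := by
  induction L with
  | nil => intro dA dB h _ _; simpa using h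
  | cons p t ih =>
    intro dA dB h hnd hne
    obtain ⟨n, c⟩ := p
    have hndA : dA.keys.Nodup := by rw [keys_eq_of_items_map dA dB h]; exact hnd
    have hkeys : dA.keys = dB.keys := keys_eq_of_items_map dA dB h
    have hcont : dA.contains n = dB.contains n := by
      rw [PySem.Dict.contains_eq_decide_mem_keys, PySem.Dict.contains_eq_decide_mem_keys, hkeys]
    simp only [List.foldl_cons]
    by_cases hc : dB.contains n = true
    · -- key already present
      have hgs : ∃ cs, dB.get? n = some cs := by
        have := PySem.Dict.contains_eq_isSome_get? (d := dB) (k := n)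
        rw [hc] at this
        exact Option.isSome_iff_exists.mp this.symm
      obtain ⟨cs, hget⟩ := hgs
      have hmem : (n, cs) ∈ dB.items := PySem.Dict.mem_items_of_get?_eq_some dB hget
      have hgetD : dB.getD n [] = cs := by
        rw [PySem.Dict.getD_eq_get?_getD, hget]; rfl
      have hcs : cs ≠ [] := hne _ hmem
      obtain ⟨m, hm⟩ := max?_isSome_of_ne_nil cs hcs
      have hmemA : (n, m) ∈ dA.items := by
        rw [h]
        have : pvMax (n, cs) = (n, m) := by simp [pvMax, hm]
        exact this ▸ List.mem_map_of_mem hmem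
      have hgA : dA.getD n 0 = m := PySem.Dict.getD_of_mem_items dA hmemA hndA 0
      -- items of the two updated dicts
      have hBit : (pvStepB dB (n, c)).items =
          dB.items.map (fun q => if q.1 == n then (n, cs ++ [c]) else q) := by
        simp only [pvStepB, hgetD]
        exact PySem.Dict.items_insert_of_contains dB (cs ++ [c]) hc
      have hqcs : ∀ q ∈ dB.items, q.1 = n → q = (n, cs) := by
        rintro ⟨q1, q2⟩ hq rfl
        have h2 : dB.getD q1 [] = q2 := PySem.Dict.getD_of_mem_items dB hq hnd []
        have h3 : q2 = cs := by rw [← h2, hgetD]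
        rw [h3]
      have hmaxnew : pvMax (n, cs ++ [c]) = (n, if m < c then c else m) := by
        simp only [pvMax, max?_append_singleton_some cs c hm]
        split <;> rfl
      -- invariant pieces for the recursive call
      have hnd' : (pvStepB dB (n, c)).keys.Nodup := by
        have : (pvStepB dB (n, c)).keys = dB.keys := by
          simp only [pvStepB]; exact PySem.Dict.keys_insert_of_contains dB _ hc
        rw [this]; exact hnd
      have hne' : ∀ q ∈ (pvStepB dB (n, c)).items, q.2 ≠ [] := by
        rw [hBit]
        intro q hq
        obtain ⟨r, hr, hrq⟩ := List.mem_map.mp hq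
        by_cases h1 : r.1 == n
        · simp [h1] at hrq; subst hrq; simp
        · simp [h1] at hrq; subst hrq; exact hne r hr
      apply ih
      · -- items relation after one step
        rw [hBit, List.map_map]
        by_cases hmc : m > c
        · -- guard fires: A unchanged
          have : pvStepA dA (n, c) = dA := by
            simp [pvStepA, hcont, hc, hgA, hmc]
          rw [this, h]
          apply List.map_congr_left
          intro q hq
          by_cases h1 : q.1 = n
          · have hq' := hqcs q hq h1
            subst hq'
            simp only [Function.comp_def, beq_self_eq_true, if_true]
            rw [hmaxnew, if_neg (by omega)]
            simp [pvMax, hm]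
          · simp [h1]
        · -- guard does not fire: A overwrites
          have : pvStepA dA (n, c) = dA.insert n c := by
            simp only [pvStepA]
            rw [if_neg]; intro ⟨_, h2⟩; rw [hgA] at h2; omega
          rw [this, PySem.Dict.items_insert_of_contains dA c (hcont ▸ hc), h, List.map_map]
          apply List.map_congr_left
          intro q hq
          by_cases h1 : q.1 = n
          · have hq' := hqcs q hq h1
            subst hq'
            simp only [Function.comp_def, pvMax_fst, beq_self_eq_true, if_true]
            rw [hmaxnew]
            congr 1
            split <;> omega
          · simp [h1, pvMax]
      · exact hnd'
      · exact hne'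
    · -- fresh key
      have hc' : dB.contains n = false := by simpa using hc
      have hcA : dA.contains n = false := by rw [hcont]; exact hc'
      have hA1 : pvStepA dA (n, c) = dA.insert n c := by
        simp [pvStepA, hcA]
      have hB1 : (pvStepB dB (n, c)).items = dB.items ++ [(n, [c])] := by
        simp only [pvStepB, PySem.Dict.getD_of_not_contains dB ([]:List Int) hc', List.nil_append]
        exact PySem.Dict.items_insert_of_not_contains dB [c] hc'
      apply ih
      · rw [hA1, PySem.Dict.items_insert_of_not_contains dA c hcA, hB1, List.map_append, h]
        rfl
      · have : (pvStepB dB (n, c)).keys = dB.keys ++ [n] := by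
          simp only [pvStepB]
          exact PySem.Dict.keys_insert_of_not_contains dB _ hc'
        rw [this]
        refine List.Nodup.append hnd (List.nodup_singleton n) ?_
        intro a ha hb
        simp at hb; subst hb
        have := PySem.Dict.contains_eq_decide_mem_keys (d := dB) (k := a)
        rw [hc'] at this
        exact absurd ha (by simpa using this.symm)
      · rw [hB1]
        intro q hq
        rcases List.mem_append.mp hq with h1 | h1
        · exact hne q h1
        · simp at h1; subst h1; simp

theorem all_placeholders_for_email_name_py_spec : Claim_equal_all_placeholders_for_email_name_py := by
  intro lp _
  unfold Spec_all_placeholders_for_email_name_py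
  unfold all_placeholders_for_email_name_py all_placeholders_for_email_name_py_alt
  simp only [← List.foldl_flatMap]
  have h := pv_inv (lp.flatMap Prod.snd) PySem.Dict.empty PySem.Dict.empty
    (by simp [PySem.Dict.empty]) (by simp [PySem.Dict.keys, PySem.Dict.empty])
    (by simp [PySem.Dict.empty])
  exact h
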